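-- pv_equiv track=rewrite | github.com/Chalexz/Programacion-Ing.Computacion-AWing | Intro_a_progra/10_4_25.py | generador_de_matriz
-- ===== SOURCE A (Python) =====
-- def generador_de_matriz(largo):
--     matriz = []
--     contador = 1
--     for i in range(largo):
--         fila = []
--         for j in range(largo):
--             fila.append(contador)
--             contador += 1
--         matriz.append(fila)
--     return matriz
-- ===== SOURCE B (Python) =====
-- def generador_de_matriz(largo):
--     it = iter(range(1, largo * largo + 1))
--     return [list(fila) for fila in zip(*[it] * largo)]
-- ===== Notes on version B (the rewrite author's own statement) =====
-- stated objective: alternative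
-- what changed: B replaces A's nested loops threading a running counter with a single lazy iterator over 1..n*n chunked into rows of n via the zip(*[it]*n) grouping idiom.
import Mathlib
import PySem

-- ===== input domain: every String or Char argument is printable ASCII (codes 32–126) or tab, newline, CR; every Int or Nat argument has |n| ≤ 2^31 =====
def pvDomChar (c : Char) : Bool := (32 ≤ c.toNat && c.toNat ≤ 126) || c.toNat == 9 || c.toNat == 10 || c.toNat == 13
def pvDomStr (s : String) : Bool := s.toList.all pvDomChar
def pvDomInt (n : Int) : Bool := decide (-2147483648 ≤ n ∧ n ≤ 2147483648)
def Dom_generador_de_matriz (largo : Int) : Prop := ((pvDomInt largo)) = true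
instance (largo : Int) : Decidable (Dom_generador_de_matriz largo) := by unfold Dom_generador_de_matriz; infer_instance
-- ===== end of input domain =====

-- B chunks one lazy iterator over 1..n*n into rows of n (zip grouping idiom), replacing A's nested counter-threading loops (alternative decomposition, same cost).


-- ===== PORT A =====
-- literal transliteration: outer loop threads (matriz, contador); inner loop threads (fila, contador);
-- Python's O(1) list.append is transliterated as Array.push (result returned as lists)
def generador_de_matriz (largo : Int) : List (List Int) :=
  let st := (PySem.List.pyRange 0 largo 1).foldl
    (fun (st : Array (List Int) × Int) _i =>
      let inner := (PySem.List.pyRange 0 largo 1).foldl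
        (fun (p : Array Int × Int) _j => (p.1.push p.2, p.2 + 1)) (#[], st.2)
      (st.1.push inner.1.toList, inner.2))
    (#[], 1)
  st.1.toList

-- ===== PORT B =====
-- zip(*[it]*n) over the lazy iterator it = iter(range(1, stop)): the iterator is its next value 'cur';
-- each step draws the next n values while a full group of n remains before stop (lazy: nothing drawn otherwise)
def pvChunk (n : Nat) (cur stop : Int) : List (List Int) :=
  if _h : 0 < n ∧ cur + n ≤ stop then
    PySem.List.pyRange cur (cur + n) 1 :: pvChunk n (cur + n) stop
  else []
termination_by (stop - cur).toNat
decreasing_by omega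

def generador_de_matriz_alt (largo : Int) : List (List Int) :=
  pvChunk largo.toNat 1 (largo * largo + 1)

-- ===== PRECONDITION & SPEC =====
def Spec_generador_de_matriz (largo : Int) (out : List (List Int)) : Prop := out = generador_de_matriz_alt largo
instance (largo : Int) (out : List (List Int)) : Decidable (Spec_generador_de_matriz largo out) := by unfold Spec_generador_de_matriz; infer_instance

-- ===== CLAIM (what is proved, stated in full; the proofs are below) =====
def Claim_equal_generador_de_matriz : Prop := ∀ (largo : Int), Dom_generador_de_matriz largo → Spec_generador_de_matriz largo (generador_de_matriz largo)

-- ===== LEMMAS AND PROOFS =====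

-- the inner fold ignores list elements: it pushes c, c+1, … and advances the counter by the length
theorem pv_inner_fold {α : Type} (l : List α) (p : Array Int × Int) :
    l.foldl (fun (p : Array Int × Int) _ => (p.1.push p.2, p.2 + 1)) p
      = (p.1 ++ ((List.range l.length).map (fun k : Nat => p.2 + (k : Int))).toArray,
         p.2 + l.length) := by
  induction l generalizing p with
  | nil => simp
  | cons a t ih =>
      rw [List.foldl_cons, ih]
      refine Prod.ext ?_ ?_
      · rw [← Array.toList_inj]
        simp [List.range_succ_eq_map, List.map_map, Function.comp]
        intro k _; ring
      · simp; ring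

-- the outer fold: row r of the produced block starts at counter + r*n, counter advances by len*n
theorem pv_outer_fold {α : Type} (n : Int) (l : List α) (q : Array (List Int) × Int) :
    l.foldl
      (fun (st : Array (List Int) × Int) _ =>
        let inner := (PySem.List.pyRange 0 n 1).foldl
          (fun (p : Array Int × Int) _ => (p.1.push p.2, p.2 + 1)) (#[], st.2)
        (st.1.push inner.1.toList, inner.2))
      q
      = (q.1 ++ ((List.range l.length).map
            (fun r : Nat => (List.range n.toNat).map
              (fun k : Nat => q.2 + (r : Int) * (n.toNat : Int) + (k : Int)))).toArray,
         q.2 + (l.length : Int) * (n.toNat : Int)) := by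
  induction l generalizing q with
  | nil => simp
  | cons a t ih =>
      rw [List.foldl_cons, ih]
      simp only [pv_inner_fold, Array.toList_append, PySem.List.length_pyRange_one, Int.sub_zero]
      refine Prod.ext ?_ ?_
      · rw [← Array.toList_inj]
        simp [List.range_succ_eq_map, List.map_map, Function.comp]
        intro r _ k _; ring
      · simp; ring

-- chunking m*n successive values of the stream yields the m rows of the closed form
theorem pv_chunk_closed (n : Nat) (hn : 0 < n) :
    ∀ (m : Nat) (cur : Int), pvChunk n cur (cur + m * n)
      = (List.range m).map (fun r : Nat =>
          (List.range n).map (fun k : Nat => cur + (r : Int) * (n : Int) + (k : Int))) := by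
  intro m
  induction m with
  | zero =>
      intro cur
      rw [pvChunk, dif_neg (by push_cast; omega)]
      simp
  | succ m ih =>
      intro cur
      have hm : (0 : Int) ≤ (m : Int) := Int.natCast_nonneg m
      have hn' : (0 : Int) < (n : Int) := by exact_mod_cast hn
      have hguard : 0 < n ∧ cur + (n : Int) ≤ cur + ((m : Nat) + 1 : Nat) * n := by
        refine ⟨hn, ?_⟩
        push_cast
        nlinarith
      rw [pvChunk, dif_pos hguard]
      have htail : cur + ((m : Nat) + 1 : Nat) * n = (cur + n) + (m : Nat) * n := by push_cast; ring
      rw [htail, ih (cur + n), PySem.List.pyRange_one]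
      have hcn : (cur + n - cur).toNat = n := by omega
      rw [hcn, List.range_succ_eq_map]
      simp only [List.map_cons, List.map_map]
      congr 1
      · apply List.map_congr_left
        intro k _
        push_cast
        ring
      · apply List.map_congr_left
        intro r _
        apply List.map_congr_left
        intro k _
        push_cast
        ring

-- ===== VERDICT (by name: the statement is the Claim_ definition above) =====
theorem generador_de_matriz_spec : Claim_equal_generador_de_matriz := by
  intro largo _
  show generador_de_matriz largo = generador_de_matriz_alt largo
  unfold generador_de_matriz generador_de_matriz_alt
  rw [pv_outer_fold]
  simp only [Array.toList_append, List.nil_append,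
             PySem.List.length_pyRange_one, Int.sub_zero]
  by_cases hpos : 0 < largo
  · have hl : largo = ((largo.toNat : Nat) : Int) := (Int.toNat_of_nonneg hpos.le).symm
    have hn : 0 < largo.toNat := by omega
    rw [hl, Int.toNat_natCast]
    have hstop : ((largo.toNat : Int) * largo.toNat + 1) = (1 : Int) + (largo.toNat : Int) * largo.toNat := by ring
    rw [hstop, pv_chunk_closed largo.toNat hn largo.toNat 1]
  · have h0 : largo.toNat = 0 := Int.toNat_of_nonpos (le_of_not_gt hpos)
    rw [h0, pvChunk]
    simp
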